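-- pv_equiv track=rewrite | github.com/Jo-Intelligentsia/algorithm | 프로그래머스/lv0/120843. 공 던지기/공 던지기.py | solution
-- ===== SOURCE A (Python) =====
-- def solution(numbers, k):
--     answer = 0
--     m = 0
--     cnt = 1
--     while cnt !=k:
--         cnt +=1
--         m += 2
--         if m == len(numbers) + 1:
--             m = 1
--         elif m == len(numbers):
--             m = 0
--     return numbers[m]
-- ===== SOURCE B (Python) =====
-- def solution(numbers, k):
--     return numbers[(2 * (k - 1)) % len(numbers)]
-- ===== Notes on version B (the rewrite author's own statement) =====
-- stated objective: faster
-- what changed: Replaces the O(k) step-by-step wrap-around simulation with a single closed-form modular index (2*(k-1)) % len(numbers).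
import Mathlib
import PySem

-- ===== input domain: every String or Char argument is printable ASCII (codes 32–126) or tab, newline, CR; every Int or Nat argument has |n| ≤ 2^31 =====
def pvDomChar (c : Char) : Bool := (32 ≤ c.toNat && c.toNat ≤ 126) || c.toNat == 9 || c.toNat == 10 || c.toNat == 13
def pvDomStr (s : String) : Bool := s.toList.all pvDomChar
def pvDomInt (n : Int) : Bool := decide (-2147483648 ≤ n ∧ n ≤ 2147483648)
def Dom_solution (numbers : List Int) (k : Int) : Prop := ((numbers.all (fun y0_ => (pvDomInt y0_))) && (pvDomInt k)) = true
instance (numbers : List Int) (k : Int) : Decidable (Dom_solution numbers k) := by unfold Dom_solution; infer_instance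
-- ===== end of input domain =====

-- B replaces A's O(k) step-by-step wrap simulation with one closed-form modular index (faster, asymptotic).

-- ===== PORT A =====
-- the while loop: each iteration does cnt += 1; m += 2 with the two wrap branches;
-- fuel (k-1).toNat is the number of iterations until cnt = k (for k ≥ 1; k < 1 diverges in Python, excluded by Pre_)
def solutionLoopA (n : Int) : Nat → Int → Int
  | 0, m => m
  | f + 1, m =>
      let m2 := m + 2
      solutionLoopA n f (if m2 = n + 1 then 1 else if m2 = n then 0 else m2)

def solution (numbers : List Int) (k : Int) : Int :=
  let m := solutionLoopA (numbers.length : Int) (k - 1).toNat 0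
  (PySem.List.pyGet? numbers m).getD 0   -- numbers[m]; none = IndexError, excluded by Pre_

-- ===== PORT B =====
def solution_alt (numbers : List Int) (k : Int) : Int :=
  (PySem.List.pyGet? numbers (PySem.Int.mod (2 * (k - 1)) (numbers.length : Int))).getD 0

-- ===== PRECONDITION & SPEC =====
-- Pre_ excludes exactly the inputs where Python A does not return: k < 1 (the while loop never
-- terminates), the empty list and the one-element list with k ≥ 2 (IndexError).
def Pre_solution (numbers : List Int) (k : Int) : Prop :=
  1 ≤ k ∧ (2 ≤ numbers.length ∨ (numbers.length = 1 ∧ k = 1))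
instance (numbers : List Int) (k : Int) : Decidable (Pre_solution numbers k) := by
  unfold Pre_solution; infer_instance

def pvWitness_solution : List Int × Int := ([10, 20, 30, 40, 50], 6)

def Spec_solution (numbers : List Int) (k : Int) (out : Int) : Prop := out = solution_alt numbers k
instance (numbers : List Int) (k : Int) (out : Int) : Decidable (Spec_solution numbers k out) := by
  unfold Spec_solution; infer_instance

-- ===== CLAIM (what is proved, stated in full; the proofs are below) =====
def Claim_equal_solution : Prop := ∀ (numbers : List Int) (k : Int), Dom_solution numbers k → Pre_solution numbers k → Spec_solution numbers k (solution numbers k)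

-- ===== LEMMAS AND PROOFS =====

-- loop invariant: for n ≥ 2 and 0 ≤ m < n, running f steps yields (m + 2*f) % n
theorem solutionLoopA_closed (n : Int) (hn : 2 ≤ n) :
    ∀ (f : Nat) (m : Int), 0 ≤ m → m < n → solutionLoopA n f m = (m + 2 * f) % n := by
  intro f
  induction f with
  | zero =>
      intro m h0 hlt
      simp [solutionLoopA, Int.emod_eq_of_lt h0 hlt]
  | succ f ih =>
      intro m h0 hlt
      simp only [solutionLoopA]
      by_cases h1 : m + 2 = n + 1
      · rw [if_pos h1, ih 1 (by omega) (by omega)]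
        have : (m : Int) + 2 * (f + 1 : Nat) = (1 + 2 * f) + n * 1 := by push_cast; omega
        rw [this, Int.add_mul_emod_self_left]
      · rw [if_neg h1]
        by_cases h2 : m + 2 = n
        · rw [if_pos h2, ih 0 (by omega) (by omega)]
          have : (m : Int) + 2 * (f + 1 : Nat) = (0 + 2 * f) + n * 1 := by push_cast; omega
          rw [this, Int.add_mul_emod_self_left]
        · rw [if_neg h2, ih (m + 2) (by omega) (by omega)]
          congr 1
          push_cast; ring

theorem solution_spec : Claim_equal_solution := by
  intro numbers k _ hpre
  unfold Spec_solution solution solution_alt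
  obtain ⟨hk, hcase⟩ := hpre
  rcases hcase with hn2 | ⟨hn1, hk1⟩
  · have hn : (2 : Int) ≤ (numbers.length : Int) := by exact_mod_cast hn2
    rw [solutionLoopA_closed (numbers.length : Int) hn ((k - 1).toNat) 0 le_rfl (by omega)]
    rw [PySem.Int.mod_eq_emod_of_pos (by omega)]
    have h1 : ((k - 1).toNat : Int) = k - 1 := by omega
    rw [h1]
    ring_nf
  · subst hk1
    simp [solutionLoopA, PySem.Int.mod_eq_emod_of_pos, hn1]
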